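-- pv_equiv track=rewrite | github.com/TongWu/IT5001-SoftwareDevFundamental | Lab/PE Notes/CommonChar-part1.py | common_char_r
-- ===== SOURCE A (Python) =====
-- def common_char_r(name1,name2):
--     count = 0
--     if min(len(name1), len(name2)) == len(name1):
--         min_name = name1
--         max_name = name2
--     else:
--         min_name = name2
--         max_name = name1
--     if not min_name:
--         return 0
--     if min_name[0].lower() == max_name[0].lower():
--         count += 1
--     return count + common_char_r(min_name[1:], max_name[1:])
-- ===== SOURCE B (Python) =====
-- def common_char_r(name1, name2):
--     count = 0
--     for a, b in zip(name1, name2):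
--         if a.lower() == b.lower():
--             count += 1
--     return count
-- ===== Notes on version B (the rewrite author's own statement) =====
-- stated objective: faster
-- what changed: Replaces min/max-length selection plus head/tail recursion with list slicing by a single iterative accumulating loop over zip(name1, name2), which truncates to the shorter string.
import Mathlib
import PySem

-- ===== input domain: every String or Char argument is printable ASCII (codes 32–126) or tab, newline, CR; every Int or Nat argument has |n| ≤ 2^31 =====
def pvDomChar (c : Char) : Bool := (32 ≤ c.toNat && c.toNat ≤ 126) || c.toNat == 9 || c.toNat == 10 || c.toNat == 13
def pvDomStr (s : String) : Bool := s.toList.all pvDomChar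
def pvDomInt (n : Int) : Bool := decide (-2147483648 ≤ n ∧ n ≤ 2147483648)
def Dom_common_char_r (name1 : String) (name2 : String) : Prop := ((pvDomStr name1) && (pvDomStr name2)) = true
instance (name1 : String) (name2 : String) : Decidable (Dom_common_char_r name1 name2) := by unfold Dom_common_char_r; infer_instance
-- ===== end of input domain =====

-- B replaces A's min/max selection + head/tail recursion with one iterative fold over the zipped character pairs (idiomatic single pass).


-- ===== PORT A =====
-- literal port of A over List Char: pick the shorter string as min_name, return 0 when it is
-- empty, compare lowered heads, recurse on the tails (Python's name[1:]).
def commonCharRecA (l1 l2 : List Char) : Int :=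
  if min l1.length l2.length = l1.length then
    -- min_name = l1, max_name = l2
    match l1, l2 with
    | [], _ => 0
    | _ :: _, [] => 0   -- unreachable: l2 is at least as long as l1 in this branch
    | a :: t1, b :: t2 =>
      (if PySem.Chars.lowerChar a = PySem.Chars.lowerChar b then (1 : Int) else 0)
        + commonCharRecA t1 t2
  else
    -- min_name = l2, max_name = l1
    match l2, l1 with
    | [], _ => 0
    | _ :: _, [] => 0   -- unreachable: l1 is longer than l2 in this branch
    | b :: t2, a :: t1 =>
      (if PySem.Chars.lowerChar b = PySem.Chars.lowerChar a then (1 : Int) else 0)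
        + commonCharRecA t2 t1
termination_by l1.length + l2.length
decreasing_by all_goals (simp; omega)

def common_char_r (name1 : String) (name2 : String) : Int :=
  commonCharRecA name1.toList name2.toList

-- ===== PORT B =====
-- for a, b in zip(name1, name2): if a.lower() == b.lower(): count += 1
def common_char_r_alt (name1 : String) (name2 : String) : Int :=
  (name1.toList.zip name2.toList).foldl
    (fun count p =>
      if PySem.Chars.lowerChar p.1 = PySem.Chars.lowerChar p.2 then count + 1 else count)
    0

-- ===== PRECONDITION & SPEC =====
def Spec_common_char_r (name1 : String) (name2 : String) (out : Int) : Prop := out = common_char_r_alt name1 name2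
instance (name1 : String) (name2 : String) (out : Int) : Decidable (Spec_common_char_r name1 name2 out) := by unfold Spec_common_char_r; infer_instance

-- ===== CLAIM (what is proved, stated in full; the proofs are below) =====
def Claim_equal_common_char_r : Prop := ∀ (name1 : String) (name2 : String), Dom_common_char_r name1 name2 → Spec_common_char_r name1 name2 (common_char_r name1 name2)

-- ===== LEMMAS AND PROOFS =====

-- recursive counting of matching lowered pairs (proof-side characterisation of B's fold)
def gCount : List (Char × Char) → Int
  | [] => 0
  | (a, b) :: t =>
    (if PySem.Chars.lowerChar a = PySem.Chars.lowerChar b then (1 : Int) else 0) + gCount t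

theorem foldl_eq_gCount (xs : List (Char × Char)) (acc : Int) :
    xs.foldl (fun count p =>
      if PySem.Chars.lowerChar p.1 = PySem.Chars.lowerChar p.2 then count + 1 else count) acc
    = acc + gCount xs := by
  induction xs generalizing acc with
  | nil => simp [gCount]
  | cons hd tl ih =>
    obtain ⟨a, b⟩ := hd
    simp only [List.foldl, gCount]
    rw [ih]
    split <;> ring

theorem gCount_zip_comm (l1 l2 : List Char) :
    gCount (l1.zip l2) = gCount (l2.zip l1) := by
  induction l1 generalizing l2 with
  | nil => cases l2 <;> simp [gCount]
  | cons a t1 ih =>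
    cases l2 with
    | nil => simp [gCount]
    | cons b t2 =>
      simp only [List.zip_cons_cons, gCount, ih t2]
      congr 1
      exact if_congr eq_comm rfl rfl

theorem commonCharRecA_eq (l1 l2 : List Char) :
    commonCharRecA l1 l2 = gCount (l1.zip l2) := by
  induction hn : l1.length + l2.length using Nat.strong_induction_on generalizing l1 l2 with
  | _ n ih =>
  match l1, l2 with
  | [], l2 =>
    rw [commonCharRecA.eq_def]
    simp [gCount]
  | a :: t1, [] =>
    rw [commonCharRecA.eq_def]
    simp [gCount]
  | a :: t1, b :: t2 =>
    rw [commonCharRecA.eq_def]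
    by_cases hc : min (a :: t1).length (b :: t2).length = (a :: t1).length
    · rw [if_pos hc]
      simp only [List.zip_cons_cons, gCount]
      congr 1
      exact ih (t1.length + t2.length) (by subst hn; simp; omega) t1 t2 rfl
    · rw [if_neg hc]
      simp only [List.zip_cons_cons, gCount]
      rw [gCount_zip_comm t1 t2,
        ← ih (t2.length + t1.length) (by subst hn; simp; omega) t2 t1 rfl]
      congr 1
      exact if_congr eq_comm rfl rfl

-- ===== VERDICT (by name: the statement is the Claim_ definition above) =====
theorem common_char_r_spec : Claim_equal_common_char_r := by
  intro name1 name2 _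
  unfold Spec_common_char_r common_char_r common_char_r_alt
  rw [foldl_eq_gCount, commonCharRecA_eq]
  ring
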